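-- pv_equiv track=rewrite | github.com/paulcbn/schedulator | crawler/management/commands/generatestatictables.py | backtrack_through_formations
-- ===== SOURCE A (Python) =====
-- def backtrack_through_formations(formation_sets):
--     if len(formation_sets) == 0:
--         return [tuple(), ]
--     result = []
--     partial_results = backtrack_through_formations(formation_sets[1:])
--     for section in formation_sets[0]:
--         for partial_result in partial_results:
--             result.append((section, *partial_result))
--     return result
-- ===== SOURCE B (Python) =====
-- def backtrack_through_formations(formation_sets):
--     result = [()]
--     for fs in formation_sets:
--         result = [p + (x,) for p in result for x in fs]
--     return result
-- ===== Notes on version B (the rewrite author's own statement) =====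
-- stated objective: simpler
-- what changed: Replaces the recursion over the tail (with nested append loops prepending each section) by an iterative left-to-right fold that extends each existing partial tuple on the right via a comprehension.
import Mathlib
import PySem

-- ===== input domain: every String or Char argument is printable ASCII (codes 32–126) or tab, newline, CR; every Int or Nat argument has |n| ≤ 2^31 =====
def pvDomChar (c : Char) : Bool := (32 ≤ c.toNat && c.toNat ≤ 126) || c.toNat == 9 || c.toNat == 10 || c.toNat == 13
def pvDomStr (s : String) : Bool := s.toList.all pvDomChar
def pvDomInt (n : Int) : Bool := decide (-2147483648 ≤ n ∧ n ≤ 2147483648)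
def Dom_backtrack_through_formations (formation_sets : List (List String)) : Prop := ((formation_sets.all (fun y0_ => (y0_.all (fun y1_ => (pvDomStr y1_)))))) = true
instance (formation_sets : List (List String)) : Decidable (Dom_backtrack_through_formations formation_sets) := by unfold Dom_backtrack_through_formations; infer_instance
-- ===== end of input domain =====

-- ===== PORT A =====
-- literal port of A: recursion on the tail, nested loops appending (section, *partial)
def backtrack_through_formations (formation_sets : List (List String)) : List (List String) :=
  match formation_sets with
  | [] => [[]]
  | f0 :: rest =>
    let partial_results := backtrack_through_formations rest
    f0.foldl (fun result section_ =>
      partial_results.foldl (fun res p => res ++ [section_ :: p]) result) []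

-- ===== PORT B =====
-- port of B: iterative fold, extending each partial on the right (the comprehension)
def backtrack_through_formations_alt (formation_sets : List (List String)) : List (List String) :=
  formation_sets.foldl
    (fun result fs => result.flatMap (fun p => fs.map (fun x => p ++ [x]))) [[]]

-- ===== PRECONDITION & SPEC =====
def Spec_backtrack_through_formations (formation_sets : List (List String)) (out : List (List String)) : Prop := out = backtrack_through_formations_alt formation_sets
instance (formation_sets : List (List String)) (out : List (List String)) : Decidable (Spec_backtrack_through_formations formation_sets out) := by unfold Spec_backtrack_through_formations; infer_instance

-- ===== CLAIM (what is proved, stated in full; the proofs are below) =====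
def Claim_equal_backtrack_through_formations : Prop := ∀ (formation_sets : List (List String)), Dom_backtrack_through_formations formation_sets → Spec_backtrack_through_formations formation_sets (backtrack_through_formations formation_sets)

-- ===== LEMMAS AND PROOFS =====

-- A in flatMap form
theorem portA_cons (f0 : List String) (rest : List (List String)) :
    backtrack_through_formations (f0 :: rest)
      = f0.flatMap (fun s => (backtrack_through_formations rest).map (fun p => s :: p)) := by
  simp only [backtrack_through_formations]
  rw [show (fun (result : List (List String)) (section_ : String) =>
        (backtrack_through_formations rest).foldl (fun res p => res ++ [section_ :: p]) result)
      = fun result section_ => result ++ ((backtrack_through_formations rest).map (fun p => section_ :: p))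
    from funext fun r => funext fun s => PySem.List.foldl_append_singleton_eq_map ..]
  rw [PySem.List.foldl_append_eq_flatMap]
  simp

-- B's loop invariant: the running result times the product of the remaining sets
theorem altB_invariant (fss : List (List String)) (acc : List (List String)) :
    fss.foldl (fun result fs => result.flatMap (fun p => fs.map (fun x => p ++ [x]))) acc
      = acc.flatMap (fun p => (backtrack_through_formations fss).map (fun q => p ++ q)) := by
  induction fss generalizing acc with
  | nil => simp [backtrack_through_formations]
  | cons f0 rest ih =>
    rw [List.foldl_cons, ih, portA_cons]
    simp [List.flatMap_assoc, List.map_flatMap, List.flatMap_map, Function.comp_def,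
      List.append_assoc]

-- ===== VERDICT (by name: the statement is the Claim_ definition above) =====
theorem backtrack_through_formations_spec : Claim_equal_backtrack_through_formations := by
  intro fss _
  show _ = _
  rw [backtrack_through_formations_alt, altB_invariant]
  simp
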